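-- pv_equiv track=rewrite | github.com/Gheeraert/Ekdosis-TEI-Studio | src/ets/ui/tk/main_window.py | _split_parallel_blocks_with_start_lines
-- ===== SOURCE A (Python) =====
-- def _split_parallel_blocks_with_start_lines(text: str, witness_count: int) -> dict[int, int]:
--     starts: dict[int, int] = {}
--     current_count = 0
--     current_start_line = 1
--     block_index = 0
--     for line_number, raw_line in enumerate(text.splitlines(), start=1):
--         if raw_line.strip() == "":
--             if current_count:
--                 if current_count == witness_count:
--                     starts[block_index] = current_start_line
--                 block_index += 1
--                 current_count = 0
--             current_start_line = line_number + 1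
--             continue
--         if current_count == 0:
--             current_start_line = line_number
--         current_count += 1
--     if current_count:
--         if current_count == witness_count:
--             starts[block_index] = current_start_line
--     return starts
-- ===== SOURCE B (Python) =====
-- def _split_parallel_blocks_with_start_lines(text: str, witness_count: int) -> dict[int, int]:
--     # Build the list of non-empty blocks as (start_line, length), then filter.
--     lines = text.splitlines()
--     n = len(lines)
--     blocks = []
--     i = 0
--     while i < n:
--         if lines[i].strip() == "":
--             i += 1
--             continue
--         j = i
--         while j < n and lines[j].strip() != "":
--             j += 1
--         blocks.append((i + 1, j - i))
--         i = j
--     return {idx: start for idx, (start, length) in enumerate(blocks)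
--             if length == witness_count}
-- ===== Notes on version B (the rewrite author's own statement) =====
-- stated objective: alternative
-- what changed: Replaces the streaming state machine (current_count/current_start_line/block_index updated per line) with a build-then-filter decomposition: first scan the lines into a list of (start_line, length) blocks, then a dict comprehension keeps the blocks whose length equals witness_count.
import Mathlib
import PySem

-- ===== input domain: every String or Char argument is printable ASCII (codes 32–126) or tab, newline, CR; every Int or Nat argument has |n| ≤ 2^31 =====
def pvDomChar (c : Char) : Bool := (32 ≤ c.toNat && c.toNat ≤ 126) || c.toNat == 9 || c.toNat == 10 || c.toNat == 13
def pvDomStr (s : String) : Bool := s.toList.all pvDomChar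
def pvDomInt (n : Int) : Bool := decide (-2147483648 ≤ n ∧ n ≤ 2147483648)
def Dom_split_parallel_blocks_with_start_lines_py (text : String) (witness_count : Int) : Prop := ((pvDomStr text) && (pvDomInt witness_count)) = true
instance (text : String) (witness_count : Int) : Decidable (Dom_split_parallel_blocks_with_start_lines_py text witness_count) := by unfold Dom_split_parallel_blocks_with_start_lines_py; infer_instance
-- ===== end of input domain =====

-- B replaces A's per-line state machine by a build-nonempty-blocks-then-filter decomposition; same cost, different structure. Equivalence proved on all inputs.

-- ===== PORT A =====
-- the for-loop of A, as recursion over the remaining lines carrying line_number and the state (starts, current_count, current_start_line, block_index)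
def pvLoopA (wc : Int) : List String → Int → PySem.Dict Int Int × Int × Int × Int → PySem.Dict Int Int × Int × Int × Int
  | [], _, st => st
  | raw :: rest, ln, (starts, cc, csl, bi) =>
    if PySem.Str.strip raw == "" then
      if cc ≠ 0 then
        pvLoopA wc rest (ln + 1)
          ((if cc == wc then starts.insert bi csl else starts), 0, ln + 1, bi + 1)
      else
        pvLoopA wc rest (ln + 1) (starts, cc, ln + 1, bi)
    else
      pvLoopA wc rest (ln + 1) (starts, cc + 1, (if cc == 0 then ln else csl), bi)

-- the code after the loop (trailing-block insert), then the dict as items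
def pvFinalA (wc : Int) (st : PySem.Dict Int Int × Int × Int × Int) : List (Int × Int) :=
  (if st.2.1 ≠ 0 then (if st.2.1 == wc then st.1.insert st.2.2.2 st.2.2.1 else st.1) else st.1).items

def split_parallel_blocks_with_start_lines_py (text : String) (witness_count : Int) : List (Int × Int) :=
  pvFinalA witness_count
    (pvLoopA witness_count (PySem.Str.splitlines text) 1 (PySem.Dict.empty, 0, 1, 0))

-- ===== PORT B =====
def pvNonblank (s : String) : Bool := !(PySem.Str.strip s == "")

-- Source B's outer while loop: skip blank lines, otherwise take the run of non-blank lines as one block (i is the 0-based index)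
def pvBlocks : List String → Int → List (Int × Int)
  | [], _ => []
  | l :: ls, i =>
    if pvNonblank l then
      (i + 1, 1 + ((ls.takeWhile pvNonblank).length : Int)) ::
        pvBlocks (ls.dropWhile pvNonblank) (i + 1 + ((ls.takeWhile pvNonblank).length : Int))
    else
      pvBlocks ls (i + 1)
  termination_by l _ => l.length
  decreasing_by
  · simp only [List.length_cons]
    exact Nat.lt_succ_of_le (List.length_dropWhile_le _ _)
  · simp

def split_parallel_blocks_with_start_lines_py_alt (text : String) (witness_count : Int) : List (Int × Int) :=
  (PySem.List.enumerate (pvBlocks (PySem.Str.splitlines text) 0) 0).filterMap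
    (fun p => if p.2.2 == witness_count then some (p.1, p.2.1) else none)

-- ===== PRECONDITION & SPEC =====
def Spec_split_parallel_blocks_with_start_lines_py (text : String) (witness_count : Int) (out : List (Int × Int)) : Prop := out = split_parallel_blocks_with_start_lines_py_alt text witness_count
instance (text : String) (witness_count : Int) (out : List (Int × Int)) : Decidable (Spec_split_parallel_blocks_with_start_lines_py text witness_count out) := by unfold Spec_split_parallel_blocks_with_start_lines_py; infer_instance

-- ===== CLAIM (what is proved, stated in full; the proofs are below) =====
def Claim_equal_split_parallel_blocks_with_start_lines_py : Prop := ∀ (text : String) (witness_count : Int), Dom_split_parallel_blocks_with_start_lines_py text witness_count → Spec_split_parallel_blocks_with_start_lines_py text witness_count (split_parallel_blocks_with_start_lines_py text witness_count)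

-- ===== LEMMAS AND PROOFS =====
-- the filter that B applies to the enumerated block list, with a general starting index
def pvSel (wc bi : Int) (blocks : List (Int × Int)) : List (Int × Int) :=
  (PySem.List.enumerate blocks bi).filterMap
    (fun p => if p.2.2 == wc then some (p.1, p.2.1) else none)

lemma pvSel_nil (wc bi : Int) : pvSel wc bi [] = [] := rfl

lemma pvSel_cons (wc bi s c : Int) (blocks : List (Int × Int)) :
    pvSel wc bi ((s, c) :: blocks)
      = (if c == wc then [(bi, s)] else []) ++ pvSel wc (bi + 1) blocks := by
  simp only [pvSel, PySem.List.enumerate_cons, List.filterMap_cons]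
  by_cases h : c = wc <;> simp [h]

lemma pvDropWhileHead {p : String → Bool} : ∀ {ls : List String} {b : String} {rest : List String},
    ls.dropWhile p = b :: rest → p b = false := by
  intro ls
  induction ls with
  | nil => intro b rest h; simp [List.dropWhile] at h
  | cons x xs ih =>
    intro b rest h
    by_cases hx : p x
    · rw [List.dropWhile_cons_of_pos hx] at h
      exact ih h
    · rw [List.dropWhile_cons_of_neg hx] at h
      rw [← (List.cons.injEq ..).mp h |>.1]
      exact Bool.eq_false_iff.mpr hx

-- A's loop over a run of non-blank lines just counts them
lemma pvLoopA_run (wc : Int) (r : List String) (hr : ∀ x ∈ r, pvNonblank x = true) :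
    ∀ (rest : List String) (ln : Int) (starts : PySem.Dict Int Int) (cc csl bi : Int),
      0 < cc →
      pvLoopA wc (r ++ rest) ln (starts, cc, csl, bi)
        = pvLoopA wc rest (ln + r.length) (starts, cc + r.length, csl, bi) := by
  induction r with
  | nil => intro rest ln starts cc csl bi _; simp
  | cons x xs ih =>
    intro rest ln starts cc csl bi hcc
    have hx' : (PySem.Str.strip x == "") = false := by
      simpa [pvNonblank] using hr x (by simp)
    have hxs : ∀ y ∈ xs, pvNonblank y = true := fun y hy => hr y (by simp [hy])
    have hcc0 : ((cc == (0 : Int)) = true) = False := by simp; omega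
    simp only [List.cons_append, pvLoopA, hx', Bool.false_eq_true, if_false, hcc0]
    rw [ih hxs rest (ln + 1) starts (cc + 1) csl bi (by omega)]
    push_cast [List.length_cons]
    ring_nf

-- main invariant: starting between blocks (current_count = 0), A's remaining work equals
-- the already-built dict items followed by B's filtered blocks of the remaining lines
lemma pvMain (wc : Int) : ∀ (n : Nat) (lines : List String), lines.length ≤ n →
    ∀ (i : Int) (starts : PySem.Dict Int Int) (csl bi : Int),
      (∀ k ∈ starts.keys, k < bi) →
      pvFinalA wc (pvLoopA wc lines (i + 1) (starts, 0, csl, bi))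
        = starts.items ++ pvSel wc bi (pvBlocks lines i) := by
  intro n
  induction n with
  | zero =>
    intro lines hlen i starts csl bi _
    have hnil : lines = [] := List.length_eq_zero_iff.mp (by omega)
    subst hnil
    simp [pvLoopA, pvFinalA, pvBlocks, pvSel]
  | succ n ih =>
    intro lines hlen i starts csl bi hinv
    cases lines with
    | nil => simp [pvLoopA, pvFinalA, pvBlocks, pvSel]
    | cons l ls =>
      by_cases hl : pvNonblank l = true
      · -- non-blank head: the run of non-blank lines forms one block
        have hl' : (PySem.Str.strip l == "") = false := by simpa [pvNonblank] using hl
        set r := ls.takeWhile pvNonblank with hrdef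
        set rest := ls.dropWhile pvNonblank with hrestdef
        have hsplit : ls = r ++ rest := (List.takeWhile_append_dropWhile).symm
        have hrall : ∀ x ∈ r, pvNonblank x = true := fun x hx => List.mem_takeWhile_imp hx
        have hbi : starts.contains bi = false := by
          rw [PySem.Dict.contains_eq_decide_mem_keys]
          simp only [decide_eq_false_iff_not]
          intro hmem; exact absurd (hinv bi hmem) (lt_irrefl bi)
        have hgt : (0 : Int) ≤ (r.length : Int) := Int.natCast_nonneg _
        have step1 : pvLoopA wc (l :: ls) (i + 1) (starts, 0, csl, bi)
            = pvLoopA wc rest (i + 1 + 1 + r.length) (starts, 1 + r.length, i + 1, bi) := by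
          conv_lhs => rw [hsplit]
          simp only [pvLoopA, hl', Bool.false_eq_true, if_false, beq_self_eq_true, if_true,
            zero_add]
          exact pvLoopA_run wc r hrall rest (i + 1 + 1) starts 1 (i + 1) bi one_pos
        have hblocks : pvBlocks (l :: ls) i
            = (i + 1, 1 + (r.length : Int)) :: pvBlocks rest (i + 1 + r.length) := by
          rw [pvBlocks, if_pos hl, ← hrdef, ← hrestdef]
        have hne : ((1 : Int) + (r.length : Int) ≠ 0) := by omega
        cases hrest : rest with
        | nil =>
          -- trailing block: handled by the post-loop insert
          rw [step1, hrest]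
          simp only [pvLoopA, pvFinalA]
          rw [hblocks, hrest]
          simp only [pvBlocks, pvSel_cons, pvSel_nil, List.append_nil]
          rw [if_pos hne]
          by_cases hw : (1 : Int) + (r.length : Int) = wc
          · simp only [hw, beq_self_eq_true, if_true]
            rw [PySem.Dict.items_insert_of_not_contains _ _ hbi]
          · have hwb : ((1 + (r.length : Int)) == wc) = false := by simp [hw]
            simp [hwb]
        | cons b rest' =>
          -- run ends at a blank line b: A closes the block and recurses on the rest
          have hb : pvNonblank b = false :=
            pvDropWhileHead (hrestdef ▸ hrest : ls.dropWhile pvNonblank = b :: rest')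
          have hb' : (PySem.Str.strip b == "") = true := by
            simpa [pvNonblank] using hb
          set starts' := if ((1 : Int) + (r.length : Int)) == wc
              then starts.insert bi (i + 1) else starts with hst'
          have step2 : pvLoopA wc rest (i + 1 + 1 + r.length) (starts, 1 + r.length, i + 1, bi)
              = pvLoopA wc rest' (i + 1 + 1 + r.length + 1)
                  (starts', 0, i + 1 + 1 + r.length + 1, bi + 1) := by
            rw [hrest]
            simp only [pvLoopA, hb', if_true]
            rw [if_pos hne, ← hst']
          have hinv' : ∀ k ∈ starts'.keys, k < bi + 1 := by
            intro k hk
            rw [hst'] at hk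
            by_cases hw : (((1 : Int) + (r.length : Int)) == wc) = true
            · rw [if_pos hw] at hk
              rcases (PySem.Dict.mem_keys_insert _ _ _ _).mp hk with h | h
              · omega
              · exact lt_trans (hinv k h) (by omega)
            · rw [if_neg hw] at hk
              exact lt_trans (hinv k hk) (by omega)
          have hlen' : rest'.length ≤ n := by
            have h1 : rest.length ≤ ls.length := hrestdef ▸ List.length_dropWhile_le _ _
            rw [hrest] at h1
            simp only [List.length_cons] at h1 hlen
            omega
          have hitems' : starts'.items
              = starts.items ++ (if ((1 : Int) + (r.length : Int)) == wc
                  then [(bi, i + 1)] else []) := by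
            rw [hst']
            by_cases hw : (((1 : Int) + (r.length : Int)) == wc) = true
            · rw [if_pos hw, if_pos hw, PySem.Dict.items_insert_of_not_contains _ _ hbi]
            · rw [if_neg hw, if_neg hw, List.append_nil]
          rw [step1, step2,
            ih rest' hlen' (i + 1 + 1 + r.length) starts' (i + 1 + 1 + r.length + 1) (bi + 1) hinv',
            hblocks, pvSel_cons, hitems', List.append_assoc]
          congr 2
          rw [hrest]
          simp only [pvBlocks, hb, Bool.false_eq_true, if_false]
          have : (i + 1 + 1 + (r.length : Int)) = (i + 1 + (r.length : Int) + 1) := by ring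
          rw [this]
      · -- blank head with current_count = 0: just advance the line number
        have hl' : (PySem.Str.strip l == "") = true := by
          simpa [pvNonblank] using hl
        have hlen' : ls.length ≤ n := by simp at hlen; omega
        simp only [pvLoopA, hl', if_true]
        rw [if_neg (by omega : ¬ ((0 : Int) ≠ 0)),
          ih ls hlen' (i + 1) starts (i + 1 + 1) bi hinv,
          pvBlocks, if_neg (by simp [hl])]

-- ===== VERDICT (by name: the statement is the Claim_ definition above) =====
theorem split_parallel_blocks_with_start_lines_py_spec : Claim_equal_split_parallel_blocks_with_start_lines_py := by
  intro text wc _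
  unfold Spec_split_parallel_blocks_with_start_lines_py
  unfold split_parallel_blocks_with_start_lines_py split_parallel_blocks_with_start_lines_py_alt
  have h := pvMain wc (PySem.Str.splitlines text).length (PySem.Str.splitlines text) le_rfl 0
      PySem.Dict.empty 1 0 (by simp [PySem.Dict.keys_empty])
  norm_num at h
  simpa [pvSel, PySem.Dict.items, PySem.Dict.empty] using h
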